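-- pv_equiv track=rewrite | github.com/boa50/investment-analysis-etl | data/etl/stocks_dividends.py | get_main_ticker
-- ===== SOURCE A (Python) =====
-- def get_main_ticker(tickers):
--     tickers = tickers.split(";")
--
--     for ticker in tickers:
--         if ticker[4] == "4":
--             return ticker
--
--     for ticker in tickers:
--         if ticker[4] == "3":
--             return ticker
--
--     return tickers[0]
-- ===== SOURCE B (Python) =====
-- def get_main_ticker(tickers):
--     parts = tickers.split(";")
--     fallback = None
--     for ticker in parts:
--         c = ticker[4]
--         if c == "4":
--             return ticker
--         if c == "3" and fallback is None:
--             fallback = ticker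
--     return fallback if fallback is not None else parts[0]
-- ===== Notes on version B (the rewrite author's own statement) =====
-- stated objective: simpler
-- what changed: A's two sequential scans over the split tickers are collapsed into one pass that returns immediately on a ticker whose 5th character is the digit 4 and remembers the first ticker whose 5th character is the digit 3 as a fallback.
import Mathlib
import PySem

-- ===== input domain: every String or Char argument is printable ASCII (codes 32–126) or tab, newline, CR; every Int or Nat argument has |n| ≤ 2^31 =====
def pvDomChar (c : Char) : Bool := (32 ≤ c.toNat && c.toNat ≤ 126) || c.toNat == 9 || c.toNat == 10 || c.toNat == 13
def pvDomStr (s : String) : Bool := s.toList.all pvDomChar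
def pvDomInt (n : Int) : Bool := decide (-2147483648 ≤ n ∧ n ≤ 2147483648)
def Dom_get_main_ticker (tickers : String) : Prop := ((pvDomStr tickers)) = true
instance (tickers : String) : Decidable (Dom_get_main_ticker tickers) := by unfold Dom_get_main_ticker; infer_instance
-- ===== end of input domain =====

-- B replaces A's two sequential scans of the split tickers by a single pass that
-- returns immediately on a ticker whose 5th character is the digit 4 and remembers the
-- first ticker whose 5th character is the digit 3 as a fallback (objective: simpler).

-- ===== PORT A =====
-- A's two 'for' loops have the same shape; pvFindA c ps is that loop for target char c:
-- first piece t whose 5th character equals c (Python raises IndexError where pyGet? is none; such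
-- inputs are excluded by Pre_, the 'none' branch just skips).
def pvFindA (c : Char) : List (List Char) → Option (List Char)
  | [] => none
  | t :: rest =>
    match PySem.List.pyGet? t 4 with
    | some ch => if ch = c then some t else pvFindA c rest
    | none => pvFindA c rest

def get_main_ticker (tickers : String) : String :=
  let ps := PySem.Chars.splitOn tickers.toList [';']
  match pvFindA '4' ps with
  | some t => String.ofList t
  | none =>
    match pvFindA '3' ps with
    | some t => String.ofList t
    | none => String.ofList (ps.headD [])

-- ===== PORT B =====
-- single pass with a fallback accumulator; 'first' is parts[0] for the final return.
-- (Python raises IndexError where pyGet? is none; excluded by Pre_, branch returns [].)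
def pvScanB (first : List Char) (fb : Option (List Char)) : List (List Char) → List Char
  | [] => match fb with | some f => f | none => first
  | t :: rest =>
    match PySem.List.pyGet? t 4 with
    | some c =>
      if c = '4' then t
      else if c = '3' ∧ fb = none then pvScanB first (some t) rest
      else pvScanB first fb rest
    | none => []

def get_main_ticker_alt (tickers : String) : String :=
  let ps := PySem.Chars.splitOn tickers.toList [';']
  String.ofList (pvScanB (ps.headD []) none ps)

-- ===== PRECONDITION & SPEC =====
-- Pre_ excludes exactly the inputs where Python A raises IndexError: some piece of the
-- split shorter than 5 characters is scanned by A (i.e. occurs before the first piece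
-- whose 5th character is the digit 4, at which A's first loop returns).
def Pre_get_main_ticker (tickers : String) : Prop :=
  ∀ t ∈ (PySem.Chars.splitOn tickers.toList [';']).takeWhile
      (fun t => !(t[4]? == some '4')), 4 < t.length

instance (tickers : String) : Decidable (Pre_get_main_ticker tickers) := by
  unfold Pre_get_main_ticker; infer_instance

def pvWitness_get_main_ticker : String := "PETR3;PETR4"

def Spec_get_main_ticker (tickers : String) (out : String) : Prop := out = get_main_ticker_alt tickers
instance (tickers : String) (out : String) : Decidable (Spec_get_main_ticker tickers out) := by unfold Spec_get_main_ticker; infer_instance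

-- ===== CLAIM (what is proved, stated in full; the proofs are below) =====
def Claim_equal_get_main_ticker : Prop := ∀ (tickers : String), Dom_get_main_ticker tickers → Pre_get_main_ticker tickers → Spec_get_main_ticker tickers (get_main_ticker tickers)

-- ===== LEMMAS AND PROOFS =====

theorem pvScanB_eq_find (ps : List (List Char)) (first : List Char) (fb : Option (List Char))
    (h : ∀ t ∈ ps.takeWhile (fun t => !(t[4]? == some '4')), 4 < t.length) :
    pvScanB first fb ps =
      match pvFindA '4' ps with
      | some t => t
      | none =>
        match fb with
        | some f => f
        | none =>
          match pvFindA '3' ps with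
          | some t => t
          | none => first := by
  induction ps generalizing fb with
  | nil => cases fb <;> rfl
  | cons t rest ih =>
    by_cases h4 : t[4]? = some '4'
    · have hg : PySem.List.pyGet? t 4 = some '4' := by
        rw [PySem.List.pyGet?_of_nonneg t (by norm_num : (0:Int) ≤ 4)]
        simpa using h4
      simp [pvScanB, pvFindA, hg]
    · have hmem : t ∈ (t :: rest).takeWhile (fun t => !(t[4]? == some '4')) := by
        simp [h4]
      have hlen : 4 < t.length := h t hmem
      obtain ⟨c, hc⟩ : ∃ c, t[4]? = some c := ⟨t[4], List.getElem?_eq_getElem hlen⟩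
      have hg : PySem.List.pyGet? t 4 = some c := by
        rw [PySem.List.pyGet?_of_nonneg t (by norm_num : (0:Int) ≤ 4)]
        simpa using hc
      have hc4 : c ≠ '4' := by rintro rfl; exact h4 hc
      have hrest : ∀ u ∈ rest.takeWhile (fun t => !(t[4]? == some '4')), 4 < u.length := by
        intro u hu
        exact h u (by simp [h4, hu])
      by_cases hc3 : c = '3'
      · subst hc3
        cases fb with
        | none => simp [pvScanB, pvFindA, hg, hc4, ih _ hrest]
        | some f => simp [pvScanB, pvFindA, hg, hc4, ih _ hrest]
      · cases fb with
        | none => simp [pvScanB, pvFindA, hg, hc4, hc3, ih _ hrest]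
        | some f => simp [pvScanB, pvFindA, hg, hc4, hc3, ih _ hrest]

-- ===== VERDICT (by name: the statement is the Claim_ definition above) =====
theorem get_main_ticker_spec : Claim_equal_get_main_ticker := by
  intro tickers _ hpre
  unfold Spec_get_main_ticker get_main_ticker get_main_ticker_alt
  simp only []
  rw [pvScanB_eq_find _ _ _ hpre]
  cases pvFindA '4' (PySem.Chars.splitOn tickers.toList [';']) <;>
    cases pvFindA '3' (PySem.Chars.splitOn tickers.toList [';']) <;> rfl
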